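-- pv_equiv track=rewrite | github.com/datalab-georgetown/topic_modeling | percolate_setup.py | get_tuples_with_whitelist
-- ===== SOURCE A (Python) =====
-- def get_tuples_with_whitelist(tuples, whitelist):
--     '''
--
--     :param tuples:
--     :param whitelist:
--     :return: only the tuples that include a word in the whitelist
--     '''
--     wl_tuples = []
--     for t1, t2 in tuples:
--         for wl_word in whitelist:
--             if wl_word in t1 or wl_word in t2:
--                 wl_tuples.append((t1, t2))
--                 break
--     return wl_tuples
-- ===== SOURCE B (Python) =====
-- def get_tuples_with_whitelist(tuples, whitelist):
--     '''
--     :param tuples: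
--     :param whitelist:
--     :return: only the tuples that include a word in the whitelist
--     '''
--     matched = set()
--     remaining = list(enumerate(tuples))
--     for wl_word in whitelist:
--         still = []
--         for i, (t1, t2) in remaining:
--             if wl_word in t1 or wl_word in t2:
--                 matched.add(i)
--             else:
--                 still.append((i, (t1, t2)))
--         remaining = still
--     return [t for i, t in enumerate(tuples) if i in matched]
-- ===== Notes on version B (the rewrite author's own statement) =====
-- stated objective: alternative
-- what changed: B inverts the loop nesting: each whitelist word makes one pass over a worklist of still-unmatched tuples, moving hits into a set of matched indices and keeping only misses for the next word, and a final comprehension emits the matched tuples in input order, instead of A's per-tuple scan of the whole whitelist with break.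
import Mathlib
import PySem

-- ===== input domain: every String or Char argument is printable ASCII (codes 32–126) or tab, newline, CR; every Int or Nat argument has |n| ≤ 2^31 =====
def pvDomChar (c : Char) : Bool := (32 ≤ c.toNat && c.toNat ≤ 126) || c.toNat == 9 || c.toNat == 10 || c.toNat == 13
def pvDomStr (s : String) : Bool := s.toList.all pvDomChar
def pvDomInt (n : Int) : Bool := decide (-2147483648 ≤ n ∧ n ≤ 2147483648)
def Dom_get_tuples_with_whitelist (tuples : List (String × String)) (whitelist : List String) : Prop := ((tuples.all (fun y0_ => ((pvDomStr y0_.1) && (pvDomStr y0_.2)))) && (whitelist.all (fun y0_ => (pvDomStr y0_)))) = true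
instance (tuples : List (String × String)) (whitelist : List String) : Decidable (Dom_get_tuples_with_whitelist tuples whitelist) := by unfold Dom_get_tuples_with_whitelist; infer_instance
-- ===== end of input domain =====

-- B inverts A's loop nesting: each whitelist word makes one pass over a shrinking pool of still-unmatched
-- tuples, marking matched indices in a set; the marked tuples are then emitted in input order (alternative decomposition).


-- ===== PORT A =====
-- inner 'for wl_word in whitelist: … break' loop of A
def pvAMatch (t1 t2 : String) : List String → Bool
  | [] => false
  | w :: ws => if PySem.Str.isIn w t1 || PySem.Str.isIn w t2 then true else pvAMatch t1 t2 ws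

def get_tuples_with_whitelist (tuples : List (String × String)) (whitelist : List String) : List (String × String) :=
  tuples.foldl (fun acc p => if pvAMatch p.1 p.2 whitelist then acc ++ [(p.1, p.2)] else acc) []

-- ===== PORT B =====
-- one word's pass of B: splits 'remaining' into matched indices (added to the set) and 'still'
def pvBPass (w : String) (remaining : List (Int × (String × String)))
    (m : PySem.Set Int) : PySem.Set Int × List (Int × (String × String)) :=
  remaining.foldl (fun ms p =>
    if PySem.Str.isIn w p.2.1 || PySem.Str.isIn w p.2.2
    then (PySem.Set.add ms.1 p.1, ms.2)
    else (ms.1, ms.2 ++ [p])) (m, [])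

-- B's outer loop over the whitelist, threading (matched, remaining)
def pvBMark (tuples : List (String × String)) (whitelist : List String) : PySem.Set Int :=
  (whitelist.foldl (fun st w => pvBPass w st.2 st.1)
    (PySem.Set.empty, PySem.List.enumerate tuples 0)).1

def get_tuples_with_whitelist_alt (tuples : List (String × String)) (whitelist : List String) : List (String × String) :=
  let matched := pvBMark tuples whitelist
  ((PySem.List.enumerate tuples 0).filter (fun p => PySem.Set.contains matched p.1)).map (fun p => p.2)

-- ===== PRECONDITION & SPEC =====
def Spec_get_tuples_with_whitelist (tuples : List (String × String)) (whitelist : List String) (out : List (String × String)) : Prop := out = get_tuples_with_whitelist_alt tuples whitelist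
instance (tuples : List (String × String)) (whitelist : List String) (out : List (String × String)) : Decidable (Spec_get_tuples_with_whitelist tuples whitelist out) := by unfold Spec_get_tuples_with_whitelist; infer_instance

-- ===== CLAIM (what is proved, stated in full; the proofs are below) =====
def Claim_equal_get_tuples_with_whitelist : Prop := ∀ (tuples : List (String × String)) (whitelist : List String), Dom_get_tuples_with_whitelist tuples whitelist → Spec_get_tuples_with_whitelist tuples whitelist (get_tuples_with_whitelist tuples whitelist)

-- ===== LEMMAS AND PROOFS =====

-- A's inner loop is List.any
theorem pvAMatch_eq_any (t1 t2 : String) (ws : List String) :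
    pvAMatch t1 t2 ws = ws.any (fun w => PySem.Str.isIn w t1 || PySem.Str.isIn w t2) := by
  induction ws with
  | nil => rfl
  | cons w ws ih =>
    by_cases h : (PySem.Str.isIn w t1 || PySem.Str.isIn w t2) = true <;> simp [pvAMatch, h, ih]

-- A is a filter
theorem portA_eq_filter (tuples : List (String × String)) (whitelist : List String) :
    get_tuples_with_whitelist tuples whitelist =
      tuples.filter (fun p => whitelist.any (fun w => PySem.Str.isIn w p.1 || PySem.Str.isIn w p.2)) := by
  unfold get_tuples_with_whitelist
  have key : ∀ (l : List (String × String)) (acc : List (String × String)),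
      l.foldl (fun acc p => if pvAMatch p.1 p.2 whitelist then acc ++ [(p.1, p.2)] else acc) acc =
      acc ++ l.filter (fun p => whitelist.any (fun w => PySem.Str.isIn w p.1 || PySem.Str.isIn w p.2)) := by
    intro l
    induction l with
    | nil => simp
    | cons p l ih =>
      intro acc
      rw [List.foldl_cons, List.filter_cons]
      have he : (whitelist.any (fun w => PySem.Str.isIn w p.1 || PySem.Str.isIn w p.2))
          = pvAMatch p.1 p.2 whitelist := (pvAMatch_eq_any p.1 p.2 whitelist).symm
      by_cases hb : pvAMatch p.1 p.2 whitelist = true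
      · rw [if_pos hb, he, if_pos hb, ih]
        simp
      · rw [if_neg hb, he, if_neg hb, ih]
  simpa using key tuples []

-- one pass over 'remaining' with general accumulator: matched-set membership and shape of 'still'
theorem pvBPass_mem (w : String) (remaining : List (Int × (String × String))) :
    ∀ (m : PySem.Set Int) (acc : List (Int × (String × String))) (i : Int),
      (i ∈ (remaining.foldl (fun ms p =>
          if PySem.Str.isIn w p.2.1 || PySem.Str.isIn w p.2.2
          then (PySem.Set.add ms.1 p.1, ms.2)
          else (ms.1, ms.2 ++ [p])) (m, acc)).1 ↔
        i ∈ m ∨ ∃ p ∈ remaining, p.1 = i ∧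
          (PySem.Str.isIn w p.2.1 || PySem.Str.isIn w p.2.2) = true) ∧
      (remaining.foldl (fun ms p =>
          if PySem.Str.isIn w p.2.1 || PySem.Str.isIn w p.2.2
          then (PySem.Set.add ms.1 p.1, ms.2)
          else (ms.1, ms.2 ++ [p])) (m, acc)).2 =
        acc ++ remaining.filter (fun p => !(PySem.Str.isIn w p.2.1 || PySem.Str.isIn w p.2.2)) := by
  induction remaining with
  | nil => intro m acc i; simp
  | cons p l ih =>
    intro m acc i
    rw [List.foldl_cons, List.filter_cons]
    by_cases h : (PySem.Str.isIn w p.2.1 || PySem.Str.isIn w p.2.2) = true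
    · rw [if_pos h, if_neg (by simp only [h, Bool.not_true]; exact Bool.false_ne_true)]
      refine ⟨?_, ((ih (PySem.Set.add m p.1) acc i).2)⟩
      rw [(ih (PySem.Set.add m p.1) acc i).1, PySem.Set.mem_add]
      simp only [List.mem_cons]
      constructor
      · rintro (⟨hm | rfl⟩ | ⟨q, hq, hh⟩)
        · exact Or.inl hm
        · exact Or.inr ⟨p, Or.inl rfl, rfl, h⟩
        · exact Or.inr ⟨q, Or.inr hq, hh⟩
      · rintro (hm | ⟨q, (rfl | hq), h1, h2⟩)
        · exact Or.inl (Or.inl hm)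
        · exact Or.inl (Or.inr h1.symm)
        · exact Or.inr ⟨q, hq, h1, h2⟩
    · rw [if_neg h, if_pos (by rw [Bool.not_eq_true']; exact Bool.eq_false_iff.mpr h)]
      refine ⟨?_, by rw [(ih m (acc ++ [p]) i).2, List.append_assoc]; rfl⟩
      rw [(ih m (acc ++ [p]) i).1]
      simp only [List.mem_cons]
      constructor
      · rintro (hm | ⟨q, hq, hh⟩)
        · exact Or.inl hm
        · exact Or.inr ⟨q, Or.inr hq, hh⟩
      · rintro (hm | ⟨q, (rfl | hq), h1, h2⟩)
        · exact Or.inl hm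
        · exact absurd h2 h
        · exact Or.inr ⟨q, hq, h1, h2⟩

-- the same, said about pvBPass itself
theorem pvBPass_spec (w : String) (rem : List (Int × (String × String)))
    (m : PySem.Set Int) (i : Int) :
    (i ∈ (pvBPass w rem m).1 ↔
      i ∈ m ∨ ∃ p ∈ rem, p.1 = i ∧ (PySem.Str.isIn w p.2.1 || PySem.Str.isIn w p.2.2) = true) ∧
    (pvBPass w rem m).2 = rem.filter (fun p => !(PySem.Str.isIn w p.2.1 || PySem.Str.isIn w p.2.2)) := by
  have h := pvBPass_mem w rem m [] i
  unfold pvBPass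
  exact ⟨h.1, by rw [h.2]; rfl⟩

-- the whole whitelist loop: membership of the final matched set
theorem mark_loop_mem :
    ∀ (ws : List String) (m : PySem.Set Int) (rem : List (Int × (String × String))) (i : Int),
      (i ∈ (ws.foldl (fun st w => pvBPass w st.2 st.1) (m, rem)).1 ↔
        i ∈ m ∨ ∃ p ∈ rem, p.1 = i ∧
          ws.any (fun w => PySem.Str.isIn w p.2.1 || PySem.Str.isIn w p.2.2) = true) := by
  intro ws
  induction ws with
  | nil => intro m rem i; simp
  | cons w ws ih =>
    intro m rem i
    rw [List.foldl_cons,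
        show pvBPass w rem m = ((pvBPass w rem m).1, (pvBPass w rem m).2) from rfl,
        ih (pvBPass w rem m).1 (pvBPass w rem m).2 i,
        (pvBPass_spec w rem m i).1, (pvBPass_spec w rem m i).2]
    simp only [List.any_cons]
    constructor
    · rintro ((hm | ⟨p, hp, h1, h2⟩) | ⟨p, hpf, h1, h2⟩)
      · exact Or.inl hm
      · exact Or.inr ⟨p, hp, h1, by rw [h2, Bool.true_or]⟩
      · exact Or.inr ⟨p, (List.mem_filter.mp hpf).1, h1, by rw [h2, Bool.or_true]⟩
    · rintro (hm | ⟨p, hp, h1, h2⟩)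
      · exact Or.inl (Or.inl hm)
      · by_cases hw : (PySem.Str.isIn w p.2.1 || PySem.Str.isIn w p.2.2) = true
        · exact Or.inl (Or.inr ⟨p, hp, h1, hw⟩)
        · rcases (Bool.or_eq_true _ _) ▸ h2 with hcw | hrest
          · exact absurd hcw hw
          · refine Or.inr ⟨p, List.mem_filter.mpr ⟨hp, ?_⟩, h1, hrest⟩
            rw [Bool.not_eq_true']
            exact Bool.eq_false_iff.mpr hw

-- fst is injective on enumerate
theorem enumerate_fst_inj {α : Type} (xs : List α) (s : Int) {p q : Int × α}
    (hp : p ∈ PySem.List.enumerate xs s) (hq : q ∈ PySem.List.enumerate xs s) (h : q.1 = p.1) : q = p := by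
  rcases (PySem.List.mem_enumerate_iff xs s p).mp hp with ⟨k1, hk1, rfl⟩
  rcases (PySem.List.mem_enumerate_iff xs s q).mp hq with ⟨k2, hk2, rfl⟩
  simp only at h
  have : k2 = k1 := by omega
  subst this; rfl

-- filtering enumerate by a predicate on the value, then projecting, is plain filter
theorem filter_enumerate_map {α : Type} (g : α → Bool) (xs : List α) :
    ∀ s : Int, ((PySem.List.enumerate xs s).filter (fun p => g p.2)).map (fun p => p.2) = xs.filter g := by
  induction xs with
  | nil => intro s; simp [PySem.List.enumerate_nil]
  | cons x xs ih =>
    intro s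
    rw [PySem.List.enumerate_cons]
    by_cases h : g x = true <;> simp [h, ih]

theorem mem_pvBMark (tuples : List (String × String)) (whitelist : List String) (i : Int) :
    i ∈ pvBMark tuples whitelist ↔
      ∃ p ∈ PySem.List.enumerate tuples 0, p.1 = i ∧
        whitelist.any (fun w => PySem.Str.isIn w p.2.1 || PySem.Str.isIn w p.2.2) = true := by
  unfold pvBMark
  rw [mark_loop_mem whitelist PySem.Set.empty (PySem.List.enumerate tuples 0) i]
  simp only [PySem.Set.empty, List.not_mem_nil, false_or]

-- ===== VERDICT (by name: the statement is the Claim_ definition above) =====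
theorem get_tuples_with_whitelist_spec : Claim_equal_get_tuples_with_whitelist := by
  intro tuples whitelist _
  unfold Spec_get_tuples_with_whitelist
  rw [portA_eq_filter]
  show _ = ((PySem.List.enumerate tuples 0).filter
      (fun p => PySem.Set.contains (pvBMark tuples whitelist) p.1)).map (fun p => p.2)
  have hcong : (PySem.List.enumerate tuples 0).filter
        (fun p => PySem.Set.contains (pvBMark tuples whitelist) p.1)
      = (PySem.List.enumerate tuples 0).filter
        (fun p => whitelist.any (fun w => PySem.Str.isIn w p.2.1 || PySem.Str.isIn w p.2.2)) := by
    apply List.filter_congr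
    intro p hp
    rw [Bool.eq_iff_iff, PySem.Set.contains_iff, mem_pvBMark]
    constructor
    · rintro ⟨q, hq, h1, h2⟩
      have := enumerate_fst_inj tuples 0 hp hq h1
      subst this; exact h2
    · intro h; exact ⟨p, hp, rfl, h⟩
  rw [hcong, filter_enumerate_map (fun q => whitelist.any (fun w => PySem.Str.isIn w q.1 || PySem.Str.isIn w q.2)) tuples 0]
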